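-- pv_equiv track=rewrite | github.com/jjungyeun/AlgorithmStudy2021 | SA/2104/5203.py | whoIsWinner
-- ===== SOURCE A (Python) =====
-- def countNum(card_list):
--     cnt_list = [0 for i in range(0, 10)]
--     for card in card_list:
--         cnt_list[card] += 1
--     return cnt_list
--
-- def isRun(card_list):
--     cnt_list = countNum(card_list)
--     for i in range(0,8):
--         if cnt_list[i] > 0 and cnt_list[i+1] > 0 and cnt_list[i+2] > 0:
--             return True
--     return False
--
-- def isTriplet(card_list):
--     cnt_list = countNum(card_list)
--     for cnt in cnt_list:
--         if cnt >= 3: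
--             return True
--     return False
--
-- def canWin(card_list):
--     return isRun(card_list) or isTriplet(card_list)
--
-- def whoIsWinner(player1, player2):
--     for turn in range(3, 7):
--         list1 = player1[:turn]
--         list2 = player2[:turn]
--         if canWin(list1):
--             return 1
--         if canWin(list2):
--             return 2
--
--     return 0
-- ===== SOURCE B (Python) =====
-- def _wins(cnt):
--     if any(c >= 3 for c in cnt):
--         return True
--     return any(cnt[i] > 0 and cnt[i + 1] > 0 and cnt[i + 2] > 0 for i in range(8))
--
--
-- def _first_win_turn(hand):
--     cnt = [0] * 10
--     for turn, card in enumerate(hand[:6], 1):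
--         cnt[card] += 1
--         if turn >= 3 and _wins(cnt):
--             return turn
--     return 7
--
--
-- def whoIsWinner(player1, player2):
--     t1 = _first_win_turn(player1)
--     t2 = _first_win_turn(player2)
--     if t1 <= t2 and t1 < 7:
--         return 1
--     if t2 < 7:
--         return 2
--     return 0
-- ===== Notes on version B (the rewrite author's own statement) =====
-- stated objective: alternative
-- what changed: B drops A's turn loop that re-runs canWin on each growing prefix of both hands: it computes, in one incremental per-player pass with early exit, each player's earliest winning turn (7 = never within six cards), then decides the game by comparing the two turn numbers, ties to player1.
-- outside the precondition, e.g. on whoIsWinner([2, 2, 2], [100]): A returns 1, B raises IndexError; on whoIsWinner([100], []): A raises IndexError, B raises IndexError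
import Mathlib
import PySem

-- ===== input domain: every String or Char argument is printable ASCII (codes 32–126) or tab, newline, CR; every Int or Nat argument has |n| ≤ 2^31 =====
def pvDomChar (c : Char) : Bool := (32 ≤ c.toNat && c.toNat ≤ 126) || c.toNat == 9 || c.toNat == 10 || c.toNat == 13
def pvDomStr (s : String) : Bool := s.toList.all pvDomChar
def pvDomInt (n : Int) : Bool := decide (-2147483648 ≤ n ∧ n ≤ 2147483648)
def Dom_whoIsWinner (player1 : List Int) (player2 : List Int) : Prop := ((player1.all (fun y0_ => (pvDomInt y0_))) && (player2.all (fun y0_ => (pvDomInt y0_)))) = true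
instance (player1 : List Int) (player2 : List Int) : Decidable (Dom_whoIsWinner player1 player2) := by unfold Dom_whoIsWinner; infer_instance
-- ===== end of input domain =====

-- B replaces A's turn loop (re-running canWin on every growing prefix of both hands) by one incremental
-- early-exit pass per player computing that player's earliest winning turn, then compares the two turns
-- (alternative decomposition, same cost class). Equality is claimed on Pre_ (all playable cards in -10..9).


-- ===== PORT A =====
-- cnt_list[card] += 1  (negative card wraps, out-of-range card is IndexError = none)
def pvBump (cnt : List Int) (card : Int) : Option (List Int) :=
  match PySem.List.pyGet? cnt card with
  | none => none
  | some v => PySem.List.pySet? cnt card (v + 1)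

def countNum (card_list : List Int) : Option (List Int) :=
  card_list.foldl (fun acc card => acc.bind (fun cnt => pvBump cnt card)) (some (List.replicate 10 (0 : Int)))

-- cnt_list[i] for i in 0..9 on a length-10 list is always in range: getD is exact here
def isRun (card_list : List Int) : Option Bool :=
  (countNum card_list).map (fun cnt =>
    (List.range 8).any (fun i => decide (0 < cnt.getD i 0) && decide (0 < cnt.getD (i+1) 0) && decide (0 < cnt.getD (i+2) 0)))

def isTriplet (card_list : List Int) : Option Bool :=
  (countNum card_list).map (fun cnt => cnt.any (fun c => decide (3 ≤ c)))

def canWin (card_list : List Int) : Option Bool :=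
  match isRun card_list with
  | none => none
  | some true => some true
  | some false => isTriplet card_list

def pvLoopA (player1 player2 : List Int) : List Nat → Int
  | [] => 0
  | t :: ts =>
    match canWin (PySem.List.slice player1 none (some (t : Int))) with
    | none => 0   -- IndexError path; excluded by Pre_
    | some true => 1
    | some false =>
      match canWin (PySem.List.slice player2 none (some (t : Int))) with
      | none => 0
      | some true => 2
      | some false => pvLoopA player1 player2 ts

def whoIsWinner (player1 : List Int) (player2 : List Int) : Int :=
  pvLoopA player1 player2 [3, 4, 5, 6]

-- ===== PORT B =====
-- B's _wins: triplet check first, then the run scan (cnt always has length 10 here: getD is exact)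
def pvWinsB (c : List Int) : Bool :=
  if c.any (fun x => decide (3 ≤ x)) then true
  else (List.range 8).any (fun i => decide (0 < c.getD i 0) && decide (0 < c.getD (i+1) 0) && decide (0 < c.getD (i+2) 0))

-- the 'for turn, card in enumerate(hand[:6], 1)' loop of _first_win_turn; none = IndexError
def pvFWloop : List (Int × Int) → List Int → Option Int
  | [], _ => some 7
  | (turn, card) :: rest, cnt =>
    match pvBump cnt card with
    | none => none
    | some cnt' =>
      if 3 ≤ turn ∧ pvWinsB cnt' = true then some turn else pvFWloop rest cnt'

def pvFirstWinTurn (hand : List Int) : Option Int :=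
  pvFWloop (PySem.List.enumerate (PySem.List.slice hand none (some 6)) 1) (List.replicate 10 0)

def whoIsWinner_alt (player1 : List Int) (player2 : List Int) : Int :=
  match pvFirstWinTurn player1 with
  | none => 0   -- IndexError path; excluded by Pre_
  | some t1 =>
    match pvFirstWinTurn player2 with
    | none => 0
    | some t2 =>
      if t1 ≤ t2 ∧ t1 < 7 then 1 else if t2 < 7 then 2 else 0

-- ===== PRECONDITION & SPEC =====
-- Pre_ excludes inputs with a card outside -10..9 among the first six cards of either hand: there
-- Python's cnt[card] += 1 raises IndexError in B's eager per-player pass, and in A too except when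
-- an earlier prefix already wins (A returns the winner there while B still raises).
def Pre_whoIsWinner (player1 : List Int) (player2 : List Int) : Prop :=
  (∀ x ∈ player1.take 6, -10 ≤ x ∧ x ≤ 9) ∧ (∀ x ∈ player2.take 6, -10 ≤ x ∧ x ≤ 9)
instance (player1 : List Int) (player2 : List Int) : Decidable (Pre_whoIsWinner player1 player2) := by unfold Pre_whoIsWinner; infer_instance

def pvWitness_whoIsWinner : List Int × List Int := ([1, 5, 7, 2], [4, 4, 0, 4])

def Spec_whoIsWinner (player1 : List Int) (player2 : List Int) (out : Int) : Prop := out = whoIsWinner_alt player1 player2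
instance (player1 : List Int) (player2 : List Int) (out : Int) : Decidable (Spec_whoIsWinner player1 player2 out) := by unfold Spec_whoIsWinner; infer_instance

-- ===== CLAIM (what is proved, stated in full; the proofs are below) =====
def Claim_equal_whoIsWinner : Prop := ∀ (player1 : List Int) (player2 : List Int), Dom_whoIsWinner player1 player2 → Pre_whoIsWinner player1 player2 → Spec_whoIsWinner player1 player2 (whoIsWinner player1 player2)

-- ===== LEMMAS AND PROOFS =====

-- A's run-or-triplet test as one Bool on the count list
def pvWins (c : List Int) : Bool :=
  (List.range 8).any (fun i => decide (0 < c.getD i 0) && decide (0 < c.getD (i+1) 0) && decide (0 < c.getD (i+2) 0))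
    || c.any (fun x => decide (3 ≤ x))

-- the win bit of the first m cards of q (false on the IndexError path, which Pre_ rules out)
def pvW (q : List Int) (m : Nat) : Bool :=
  ((countNum (q.take m)).map pvWins).getD false

-- earliest turn t ≥ m with 3 ≤ t, t ≤ len q and a winning prefix of t cards; 7 if none
def fws (q : List Int) (m : Nat) : Nat :=
  if _h : q.length < m then 7
  else if 3 ≤ m ∧ pvW q m = true then m
  else fws q (m+1)
termination_by q.length + 1 - m
decreasing_by omega

lemma canWin_eq_map (l : List Int) : canWin l = (countNum l).map pvWins := by
  cases h : countNum l with
  | none => simp [canWin, isRun, h]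
  | some c =>
    simp only [canWin, isRun, isTriplet, h, Option.map_some, pvWins]
    cases hr : (List.range 8).any (fun i => decide (0 < c.getD i 0) && decide (0 < c.getD (i+1) 0) && decide (0 < c.getD (i+2) 0)) <;> simp

lemma winsB_eq (c : List Int) : pvWinsB c = pvWins c := by
  cases h : c.any (fun x => decide (3 ≤ x)) <;> simp [pvWinsB, pvWins, h]

lemma bump_spec (cnt : List Int) (card : Int) (hl : cnt.length = 10)
    (h1 : -10 ≤ card) (h2 : card ≤ 9) :
    ∃ c', pvBump cnt card = some c' ∧ c'.length = 10 := by
  have hin : PySem.Raise.InRange cnt.length card := by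
    simp [PySem.Raise.InRange, hl]; omega
  have hg : PySem.List.pyGet? cnt card ≠ none := by
    rw [Ne, PySem.List.pyGet?_eq_none_iff]; exact not_not_intro hin
  obtain ⟨v, hv⟩ := Option.ne_none_iff_exists'.mp hg
  have hs : PySem.List.pySet? cnt card (v + 1) ≠ none := by
    rw [Ne, PySem.List.pySet?_eq_none_iff]; exact not_not_intro hin
  obtain ⟨c', hc'⟩ := Option.ne_none_iff_exists'.mp hs
  refine ⟨c', by simp [pvBump, hv, hc'], ?_⟩
  have := PySem.List.length_pySetD cnt card (v + 1)
  rw [PySem.List.pySetD, hc'] at this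
  simpa [hl] using this

lemma foldBump_spec (l : List Int) : ∀ (cnt : List Int),
    (∀ x ∈ l, -10 ≤ x ∧ x ≤ 9) → cnt.length = 10 →
    ∃ c, l.foldl (fun acc card => acc.bind (fun cnt => pvBump cnt card)) (some cnt) = some c ∧ c.length = 10 := by
  induction l with
  | nil => intro cnt _ hl; exact ⟨cnt, rfl, hl⟩
  | cons a l ih =>
    intro cnt hr hl
    obtain ⟨c', hb, hbl⟩ := bump_spec cnt a hl (hr a (by simp)).1 (hr a (by simp)).2
    obtain ⟨c, hc, hcl⟩ := ih c' (fun x hx => hr x (by simp [hx])) hbl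
    exact ⟨c, by simpa [hb] using hc, hcl⟩

lemma countNum_spec (l : List Int) (hr : ∀ x ∈ l, -10 ≤ x ∧ x ≤ 9) :
    ∃ c, countNum l = some c ∧ c.length = 10 :=
  foldBump_spec l (List.replicate 10 0) hr (by simp)

-- with at most two cards counted, neither a run nor a triplet is possible
lemma nowin_small (q : List Int) (hlen : q.length ≤ 2) (hr : ∀ x ∈ q, -10 ≤ x ∧ x ≤ 9) :
    ((countNum q).map pvWins).getD false = false := by
  match q, hlen with
  | [], _ => decide
  | [a], _ =>
    obtain ⟨ha1, ha2⟩ := hr a (by simp)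
    interval_cases a <;> decide
  | [a, b], _ =>
    obtain ⟨ha1, ha2⟩ := hr a (by simp)
    obtain ⟨hb1, hb2⟩ := hr b (by simp)
    interval_cases a <;> interval_cases b <;> decide

-- one step of countNum along the prefix
lemma count_take_succ (q : List Int) (k : Nat) (c : Int) (hc : q[k]? = some c) :
    countNum (q.take (k+1)) =
      (countNum (q.take k)).bind (fun cnt => pvBump cnt c) := by
  rw [countNum, countNum, List.take_add_one, hc]
  simp [List.foldl_append]

-- the incremental pass computes fws: B's loop, started after k counted cards, returns fws q (k+1)
lemma fwloop_spec (q : List Int) (hr : ∀ x ∈ q, -10 ≤ x ∧ x ≤ 9) :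
    ∀ (suf : List Int) (k : Nat) (cnt : List Int),
      q.drop k = suf → countNum (q.take k) = some cnt →
      pvFWloop (PySem.List.enumerate suf ((k : Int) + 1)) cnt = some ((fws q (k+1) : Nat) : Int) := by
  intro suf
  induction suf with
  | nil =>
    intro k cnt hdrop _
    have hk : q.length ≤ k := by
      by_contra h
      have := List.drop_eq_nil_iff.mp hdrop
      omega
    have h7 : fws q (k+1) = 7 := by rw [fws, dif_pos (by omega : q.length < k + 1)]
    simp [PySem.List.enumerate, pvFWloop, h7]
  | cons c rest ih =>
    intro k cnt hdrop hcnt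
    have hget : q[k]? = some c := by
      have := (List.getElem?_drop (xs := q) (i := k) (j := 0)).symm
      simpa [hdrop] using this
    obtain ⟨hkl, hgete⟩ := List.getElem?_eq_some_iff.mp hget
    have hmem : c ∈ q := hgete ▸ List.getElem_mem hkl
    have hcl : cnt.length = 10 := by
      obtain ⟨c0, hc0, hc0l⟩ := countNum_spec (q.take k) (fun x hx => hr x (List.mem_of_mem_take hx))
      rw [hcnt] at hc0; cases hc0; exact hc0l
    obtain ⟨cnt', hb, hbl⟩ := bump_spec cnt c hcl (hr c hmem).1 (hr c hmem).2
    have hcnt' : countNum (q.take (k+1)) = some cnt' := by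
      rw [count_take_succ q k c hget, hcnt]; simpa using hb
    rw [PySem.List.enumerate_cons]
    show pvFWloop (((k : Int) + 1, c) :: _) cnt = _
    rw [pvFWloop]
    simp only [hb]
    have hWlink : pvW q (k+1) = pvWinsB cnt' := by
      rw [pvW, hcnt', winsB_eq]; simp
    by_cases hw : 3 ≤ k + 1 ∧ pvW q (k+1) = true
    · have hcond : (3 ≤ (k : Int) + 1 ∧ pvWinsB cnt' = true) :=
        ⟨by exact_mod_cast hw.1, hWlink ▸ hw.2⟩
      rw [if_pos hcond, fws, dif_neg (by omega), if_pos hw]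
      norm_cast
    · have hcond : ¬ (3 ≤ (k : Int) + 1 ∧ pvWinsB cnt' = true) := by
        intro ⟨h3, hwb⟩
        exact hw ⟨by exact_mod_cast h3, hWlink ▸ hwb⟩
      rw [if_neg hcond]
      have hdrop' : q.drop (k+1) = rest := by
        have : (q.drop k).drop 1 = rest := by simp [hdrop]
        simpa [List.drop_drop] using this
      have hrec := ih (k+1) cnt' hdrop' hcnt'
      rw [fws, dif_neg (by omega), if_neg hw]
      push_cast at hrec ⊢
      exact hrec

-- characterisation of fws: 7, or a first winning turn in [max(3,m), len q]
lemma fws_char (q : List Int) : ∀ m, fws q m = 7 ∨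
    (3 ≤ fws q m ∧ m ≤ fws q m ∧ fws q m ≤ q.length ∧ pvW q (fws q m) = true) := by
  intro m
  induction hn : q.length + 1 - m using Nat.strong_induction_on generalizing m with
  | _ n ih =>
    rw [fws]
    by_cases h1 : q.length < m
    · rw [dif_pos h1]; left; rfl
    · rw [dif_neg h1]
      by_cases h2 : 3 ≤ m ∧ pvW q m = true
      · rw [if_pos h2]; right; exact ⟨h2.1, le_refl m, by omega, h2.2⟩
      · rw [if_neg h2]
        rcases ih (q.length + 1 - (m+1)) (by omega) (m+1) rfl with h | ⟨h3, hm, hl, hw⟩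
        · left; exact h
        · right; exact ⟨h3, by omega, hl, hw⟩

lemma fws_min (q : List Int) (t : Nat) (h3 : 3 ≤ t) (hlen : t ≤ q.length) (hw : pvW q t = true) :
    ∀ m, m ≤ t → fws q m ≤ t := by
  intro m hm
  induction hn : t - m using Nat.strong_induction_on generalizing m with
  | _ n ih =>
    rw [fws, dif_neg (by omega : ¬ q.length < m)]
    by_cases h2 : 3 ≤ m ∧ pvW q m = true
    · rw [if_pos h2]; omega
    · rw [if_neg h2]
      have hne : m ≠ t := by rintro rfl; exact h2 ⟨h3, hw⟩
      exact ih (t - (m+1)) (by omega) (m+1) (by omega) rfl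

lemma fws_succ_of_lt3 (q : List Int) (m : Nat) (hm : m < 3) : fws q m = fws q (m+1) := by
  rw [fws]
  by_cases h1 : q.length < m
  · rw [dif_pos h1]
    rw [fws, dif_pos (by omega)]
  · rw [dif_neg h1, if_neg (by omega)]

lemma fws_one_eq_three (q : List Int) : fws q 1 = fws q 3 := by
  rw [fws_succ_of_lt3 q 1 (by omega), fws_succ_of_lt3 q 2 (by omega)]

-- a winning prefix of m ≥ 3 cards (m ≤ 6) forces fws q 3 ≤ m, even past the end of a short hand
lemma fws_le_of_W (q : List Int) (hr : ∀ x ∈ q, -10 ≤ x ∧ x ≤ 9) (m : Nat)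
    (h3 : 3 ≤ m) (hw : pvW q m = true) : fws q 3 ≤ m := by
  by_cases hlen : m ≤ q.length
  · exact fws_min q m h3 hlen hw 3 h3
  · have htake : q.take m = q := List.take_of_length_le (by omega)
    by_cases hq3 : 3 ≤ q.length
    · have hwl : pvW q q.length = true := by
        rw [pvW, List.take_of_length_le (le_refl _)]
        rw [pvW, htake] at hw
        exact hw
      have := fws_min q q.length hq3 (le_refl _) hwl 3 hq3
      omega
    · exfalso
      have : pvW q m = false := by
        rw [pvW, htake]
        exact nowin_small q (by omega) hr
      rw [this] at hw; exact Bool.false_ne_true hw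

lemma fws_ne_of_W_false (q : List Int) (m : Nat) (hm6 : m ≤ 6) (hw : pvW q m = false) :
    fws q 3 ≠ m := by
  intro he
  rcases fws_char q 3 with h | ⟨_, _, _, hwt⟩
  · omega
  · rw [he, hw] at hwt; exact Bool.false_ne_true hwt

-- canWin on the m-card prefix of p, under Pre_, is some (pvW (p.take 6) m) for m ≤ 6
lemma canWin_take (p : List Int) (hr : ∀ x ∈ p.take 6, -10 ≤ x ∧ x ≤ 9) (m : Nat) (hm : m ≤ 6) :
    canWin (p.take m) = some (pvW (p.take 6) m) := by
  have htt : (p.take 6).take m = p.take m := by rw [List.take_take]; congr 1; omega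
  obtain ⟨c, hc, _⟩ := countNum_spec (p.take m)
    (fun x hx => hr x (by rw [← htt] at hx; exact List.mem_of_mem_take hx))
  rw [canWin_eq_map, hc, pvW, htt, hc]
  simp

-- A's scan over the remaining turns, related to the two fws values
lemma loopA_scan (p1 p2 : List Int)
    (hr1 : ∀ x ∈ p1.take 6, -10 ≤ x ∧ x ≤ 9) (hr2 : ∀ x ∈ p2.take 6, -10 ≤ x ∧ x ≤ 9) :
    ∀ (n m : Nat), m + n = 7 → 3 ≤ m → m ≤ fws (p1.take 6) 3 → m ≤ fws (p2.take 6) 3 →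
      pvLoopA p1 p2 (List.range' m n) =
        (if fws (p1.take 6) 3 ≤ fws (p2.take 6) 3 ∧ fws (p1.take 6) 3 < 7 then 1
         else if fws (p2.take 6) 3 < 7 then 2 else 0) := by
  have hr1' : ∀ x ∈ p1.take 6, -10 ≤ x ∧ x ≤ 9 := hr1
  intro n
  induction n with
  | zero =>
    intro m hm7 h3 hF1 hF2
    have h7 : m = 7 := by omega
    subst h7
    have e1 : fws (p1.take 6) 3 = 7 := by
      rcases fws_char (p1.take 6) 3 with h | ⟨_, _, hl, _⟩
      · exact h
      · have : (p1.take 6).length ≤ 6 := by rw [List.length_take]; omega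
        omega
    have e2 : fws (p2.take 6) 3 = 7 := by
      rcases fws_char (p2.take 6) 3 with h | ⟨_, _, hl, _⟩
      · exact h
      · have : (p2.take 6).length ≤ 6 := by rw [List.length_take]; omega
        omega
    simp [pvLoopA, e1, e2]
  | succ n ih =>
    intro m hm7 h3 hF1 hF2
    have hm6 : m ≤ 6 := by omega
    rw [List.range'_succ, pvLoopA]
    have hs1 : PySem.List.slice p1 none (some (m : Int)) = p1.take m := by
      rw [PySem.List.slice_to_natCast]
    have hs2 : PySem.List.slice p2 none (some (m : Int)) = p2.take m := by
      rw [PySem.List.slice_to_natCast]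
    rw [hs1, hs2, canWin_take p1 hr1 m hm6, canWin_take p2 hr2 m hm6]
    cases hw1 : pvW (p1.take 6) m with
    | true =>
      have hle : fws (p1.take 6) 3 ≤ m := fws_le_of_W (p1.take 6) hr1 m h3 hw1
      have he : fws (p1.take 6) 3 = m := by omega
      rw [if_pos (⟨by omega, by omega⟩ : fws (p1.take 6) 3 ≤ fws (p2.take 6) 3 ∧ fws (p1.take 6) 3 < 7)]
    | false =>
      have hne1 : fws (p1.take 6) 3 ≠ m := fws_ne_of_W_false (p1.take 6) m hm6 hw1
      cases hw2 : pvW (p2.take 6) m with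
      | true =>
        have hle : fws (p2.take 6) 3 ≤ m := fws_le_of_W (p2.take 6) hr2 m h3 hw2
        have he : fws (p2.take 6) 3 = m := by omega
        rw [if_neg (by intro ⟨ha, _⟩; omega : ¬ (fws (p1.take 6) 3 ≤ fws (p2.take 6) 3 ∧ fws (p1.take 6) 3 < 7)), if_pos (by omega : fws (p2.take 6) 3 < 7)]
      | false =>
        have hne2 : fws (p2.take 6) 3 ≠ m := fws_ne_of_W_false (p2.take 6) m hm6 hw2
        exact ih (m+1) (by omega) (by omega) (by omega) (by omega)

-- B's whole first pass on a hand, under Pre_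
lemma firstWin_eq (p : List Int) (hr : ∀ x ∈ p.take 6, -10 ≤ x ∧ x ≤ 9) :
    pvFirstWinTurn p = some ((fws (p.take 6) 3 : Nat) : Int) := by
  have hs : PySem.List.slice p none (some (6 : Int)) = p.take 6 := by
    have := PySem.List.slice_to_natCast (xs := p) (b := 6)
    simpa using this
  rw [pvFirstWinTurn, hs]
  have := fwloop_spec (p.take 6) hr (p.take 6) 0 (List.replicate 10 0) (by simp) (by rfl)
  simpa [fws_one_eq_three] using this

-- ===== VERDICT (by name: the statement is the Claim_ definition above) =====
theorem whoIsWinner_spec : Claim_equal_whoIsWinner := by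
  intro p1 p2 _ hpre
  obtain ⟨hr1, hr2⟩ := hpre
  show whoIsWinner p1 p2 = whoIsWinner_alt p1 p2
  rw [whoIsWinner, whoIsWinner_alt, firstWin_eq p1 hr1, firstWin_eq p2 hr2]
  have hlist : ([3, 4, 5, 6] : List Nat) = List.range' 3 4 := by decide
  rw [hlist, loopA_scan p1 p2 hr1 hr2 4 3 (by omega) (by omega)
    (by rcases fws_char (p1.take 6) 3 with h | ⟨h3, _, _, _⟩ <;> omega)
    (by rcases fws_char (p2.take 6) 3 with h | ⟨h3, _, _, _⟩ <;> omega)]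
  set F1 := fws (p1.take 6) 3
  set F2 := fws (p2.take 6) 3
  have hc1 : ((F1 : Int) ≤ (F2 : Int) ∧ (F1 : Int) < 7) ↔ (F1 ≤ F2 ∧ F1 < 7) := by
    constructor <;> intro ⟨ha, hb⟩ <;> exact ⟨by exact_mod_cast ha, by exact_mod_cast hb⟩
  have hc2 : ((F2 : Int) < 7) ↔ (F2 < 7) := by exact_mod_cast Iff.rfl
  simp only [hc1, hc2]
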